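-- pv_equiv track=rewrite | github.com/AzRea7/onehaven | onehaven_decision_engine/backend/app/domain/compliance/inspection_rules.py | normalize_rule_code
-- ===== SOURCE A (Python) =====
-- from typing import Any, Iterable, Optional
--
-- def normalize_rule_code(raw: Optional[str]) -> str:
--     text = str(raw or "").strip().upper()
--     if not text:
--         return ""
--     out: list[str] = []
--     prev_underscore = False
--     for ch in text:
--         if ch.isalnum():
--             out.append(ch)
--             prev_underscore = False
--         else:
--             if not prev_underscore:
--                 out.append("_")
--             prev_underscore = True
--     return "".join(out).strip("_")
-- ===== SOURCE B (Python) =====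
-- def normalize_rule_code(raw):
--     text = str(raw or "").strip().upper()
--     return "_".join("".join(ch if ch.isalnum() else " " for ch in text).split())
-- ===== Notes on version B (the rewrite author's own statement) =====
-- stated objective: simpler
-- what changed: Replaces the char-by-char loop with a prev_underscore flag plus a final strip('_') by mapping non-alphanumeric characters to spaces and letting str.split()/'_'.join() collapse runs and trim the ends.
import Mathlib
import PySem

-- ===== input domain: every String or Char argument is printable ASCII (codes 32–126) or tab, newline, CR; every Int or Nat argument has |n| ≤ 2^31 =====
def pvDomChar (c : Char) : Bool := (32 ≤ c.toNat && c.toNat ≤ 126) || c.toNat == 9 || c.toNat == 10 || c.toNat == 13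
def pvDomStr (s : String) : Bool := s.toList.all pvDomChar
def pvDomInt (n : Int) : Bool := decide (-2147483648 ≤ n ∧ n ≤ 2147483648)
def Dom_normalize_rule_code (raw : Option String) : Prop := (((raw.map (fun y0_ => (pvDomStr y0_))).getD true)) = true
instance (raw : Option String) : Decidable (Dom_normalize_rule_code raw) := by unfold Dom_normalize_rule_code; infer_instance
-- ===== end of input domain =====

-- B replaces A's char-by-char loop with a prev_underscore flag (plus a final strip('_'))
-- by mapping non-alphanumeric characters to spaces and letting split()/'_'.join collapse
-- runs and trim the ends (objective: simpler).

-- ===== PORT A =====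
def normalize_rule_code (raw : Option String) : String :=
  let text := PySem.Str.upper (PySem.Str.strip (raw.getD ""))
  if text = "" then ""
  else
    let r := text.toList.foldl
      (fun (s : List Char × Bool) ch =>
        if PySem.Chars.isalnum ch then (s.1 ++ [ch], false)
        else if s.2 = false then (s.1 ++ ['_'], true) else (s.1, true))
      ([], false)
    PySem.Str.stripChars (String.ofList r.1) "_"

-- ===== PORT B =====
def normalize_rule_code_alt (raw : Option String) : String :=
  let text := PySem.Str.upper (PySem.Str.strip (raw.getD ""))
  PySem.Str.join "_"
    (PySem.Str.split₀
      (String.ofList (text.toList.map (fun ch => if PySem.Chars.isalnum ch then ch else ' '))))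

-- ===== PRECONDITION & SPEC =====
def Spec_normalize_rule_code (raw : Option String) (out : String) : Prop := out = normalize_rule_code_alt raw
instance (raw : Option String) (out : String) : Decidable (Spec_normalize_rule_code raw out) := by unfold Spec_normalize_rule_code; infer_instance

-- ===== CLAIM (what is proved, stated in full; the proofs are below) =====
def Claim_equal_normalize_rule_code : Prop := ∀ (raw : Option String), Dom_normalize_rule_code raw → Spec_normalize_rule_code raw (normalize_rule_code raw)

-- ===== LEMMAS AND PROOFS =====

-- A's loop output as a recursive function: flag p = "previous char produced a run underscore"
def pvG : Bool → List Char → List Char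
  | _, [] => []
  | p, c :: cs =>
    if PySem.Chars.isalnum c then c :: pvG false cs
    else if p then pvG true cs else '_' :: pvG true cs

-- the maximal alphanumeric groups of a list
def pvWords : List Char → List (List Char)
  | [] => []
  | c :: cs =>
    if PySem.Chars.isalnum c then
      (c :: cs.takeWhile PySem.Chars.isalnum) :: pvWords (cs.dropWhile PySem.Chars.isalnum)
    else pvWords cs
termination_by l => l.length
decreasing_by
  · simpa using Nat.lt_succ_of_le (List.length_dropWhile_le _ _)
  · simp

def pvUnd (c : Char) : Bool := List.contains ['_'] c

def pvRstrip (l : List Char) : List Char := (List.dropWhile pvUnd l.reverse).reverse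

def pvInter (l : List (List Char)) : List Char := List.intercalate ['_'] l

theorem pv_alnum_not_space (c : Char) (h : PySem.Chars.isalnum c = true) :
    PySem.Chars.isspace c = false := by
  simp only [PySem.Chars.isalnum, PySem.Chars.isalpha, PySem.Chars.isupper, PySem.Chars.islower,
    PySem.Chars.isdigit, PySem.Chars.isspace, Char.le_def, Bool.or_eq_true, Bool.and_eq_true,
    decide_eq_true_eq] at *
  simp only [Char.toNat] at *
  rcases h with (⟨h1, h2⟩ | ⟨h1, h2⟩) | ⟨h1, h2⟩ <;>
    simp_all [UInt32.le_iff_toNat_le] <;> omega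

theorem pv_alnum_not_und (c : Char) (h : PySem.Chars.isalnum c = true) :
    pvUnd c = false := by
  by_cases hc : c = '_'
  · subst hc; simp [PySem.Chars.isalnum, PySem.Chars.isalpha, PySem.Chars.isupper,
      PySem.Chars.islower, PySem.Chars.isdigit] at h
  · simp [pvUnd, hc]

theorem pv_dropWhile_of_all {p : Char → Bool} {l : List Char}
    (h : ∀ x ∈ l, p x = false) : List.dropWhile p l = l := by
  cases l with
  | nil => rfl
  | cons a t => simp [List.dropWhile_cons, h a (List.mem_cons_self)]

theorem pv_head_dropWhile {p : Char → Bool} : ∀ {l : List Char} {d : Char} {ds : List Char},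
    l.dropWhile p = d :: ds → p d = false := by
  intro l
  induction l with
  | nil => intro d ds h; simp at h
  | cons a t ih =>
    intro d ds h
    rw [List.dropWhile_cons] at h
    by_cases hp : p a = true
    · rw [if_pos hp] at h; exact ih h
    · rw [if_neg hp] at h
      injection h with h1 _
      rw [← h1]
      simpa using hp

-- A's fold equals pvG
theorem pv_foldl_g (cs : List Char) : ∀ (acc : List Char) (p : Bool),
    (cs.foldl
      (fun (s : List Char × Bool) ch =>
        if PySem.Chars.isalnum ch then (s.1 ++ [ch], false)
        else if s.2 = false then (s.1 ++ ['_'], true) else (s.1, true))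
      (acc, p)).1 = acc ++ pvG p cs := by
  induction cs with
  | nil => intro acc p; simp [pvG]
  | cons c cs ih =>
    intro acc p
    by_cases h : PySem.Chars.isalnum c = true
    · simp [List.foldl_cons, h, ih, pvG]
    · cases p with
      | false => simp [List.foldl_cons, h, ih, pvG]
      | true => simp [List.foldl_cons, h, ih, pvG]

-- the left strip of pvG: leading underscores vanish, leaving pvG true
theorem pv_dropWhile_g (cs : List Char) : ∀ p : Bool,
    List.dropWhile pvUnd (pvG p cs) = pvG true cs := by
  induction cs with
  | nil => intro p; simp [pvG]
  | cons c cs ih =>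
    intro p
    by_cases h : PySem.Chars.isalnum c = true
    · simp [pvG, h, List.dropWhile_cons, pv_alnum_not_und c h]
    · cases p with
      | true => simp [pvG, h, ih]
      | false =>
        have hu : pvUnd '_' = true := by decide
        simp [pvG, h, List.dropWhile_cons, hu, ih]

theorem pv_words_ne_nil : ∀ (n : ℕ) (cs : List Char), cs.length ≤ n →
    ∀ w ∈ pvWords cs, w ≠ [] := by
  intro n
  induction n with
  | zero =>
    intro cs h w hw
    have : cs = [] := List.eq_nil_of_length_eq_zero (Nat.le_zero.mp h)
    subst this; simp [pvWords] at hw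
  | succ n ih =>
    intro cs h w hw
    cases cs with
    | nil => simp [pvWords] at hw
    | cons c cs =>
      by_cases hc : PySem.Chars.isalnum c = true
      · rw [pvWords, if_pos hc] at hw
        rcases List.mem_cons.mp hw with h1 | h1
        · subst h1; simp
        · have hd : (cs.dropWhile PySem.Chars.isalnum).length ≤ cs.length :=
            List.length_dropWhile_le _ _
          have hlen : (cs.dropWhile PySem.Chars.isalnum).length ≤ n := by
            simp at h; omega
          exact ih _ hlen w h1
      · rw [pvWords, if_neg hc] at hw
        have h2 : cs.length ≤ n := by simp at h; omega
        exact ih cs h2 w hw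

theorem pv_inter_cons (w : List Char) (l : List (List Char)) :
    pvInter (w :: l) = w ++ (if l = [] then [] else '_' :: pvInter l) := by
  cases l <;> simp [pvInter, List.intercalate, List.intersperse]

theorem pv_rstrip_append (a x : List Char) :
    pvRstrip (a ++ x) = if pvRstrip x = [] then pvRstrip a else a ++ pvRstrip x := by
  unfold pvRstrip
  rw [List.reverse_append, List.dropWhile_append]
  by_cases h : List.dropWhile pvUnd x.reverse = []
  · simp [h]
  · have : (List.dropWhile pvUnd x.reverse).isEmpty = false := by
      simpa [List.isEmpty_iff] using h
    simp [this, h]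

theorem pv_g_alnum_prefix (W : List Char) (R : List Char)
    (hW : ∀ x ∈ W, PySem.Chars.isalnum x = true) :
    pvG false (W ++ R) = W ++ pvG false R := by
  induction W with
  | nil => simp
  | cons a t ih =>
    have ha := hW a (List.mem_cons_self)
    simp only [List.cons_append, pvG, ha, if_pos]
    simp [ih (fun x hx => hW x (List.mem_cons_of_mem a hx))]

theorem pv_rstrip_no_und (l : List Char) (h : ∀ x ∈ l, pvUnd x = false) :
    pvRstrip l = l := by
  unfold pvRstrip
  rw [pv_dropWhile_of_all (by intro x hx; exact h x (List.mem_reverse.mp hx))]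
  simp

-- the right strip of pvG true is exactly the '_'-intercalation of the groups
theorem pv_rstrip_g : ∀ (n : ℕ) (cs : List Char), cs.length ≤ n →
    pvRstrip (pvG true cs) = pvInter (pvWords cs) := by
  intro n
  induction n with
  | zero =>
    intro cs h
    have : cs = [] := List.eq_nil_of_length_eq_zero (Nat.le_zero.mp h)
    subst this; simp [pvG, pvWords, pvInter, pvRstrip, List.intercalate]
  | succ n ih =>
    intro cs h
    cases cs with
    | nil => simp [pvG, pvWords, pvInter, pvRstrip, List.intercalate]
    | cons c cs =>
      by_cases hc : PySem.Chars.isalnum c = true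
      · -- an alphanumeric run starts
        have hWall : ∀ x ∈ cs.takeWhile PySem.Chars.isalnum, PySem.Chars.isalnum x = true :=
          fun x hx => List.mem_takeWhile_imp hx
        have hsplit : cs.takeWhile PySem.Chars.isalnum ++ cs.dropWhile PySem.Chars.isalnum = cs :=
          List.takeWhile_append_dropWhile
        have hg : pvG true (c :: cs) = c :: pvG false cs := by simp [pvG, hc]
        have hg2 : pvG false cs =
            cs.takeWhile PySem.Chars.isalnum ++
              pvG false (cs.dropWhile PySem.Chars.isalnum) := by
          conv_lhs => rw [← hsplit]
          exact pv_g_alnum_prefix _ _ hWall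
        have hwords : pvWords (c :: cs) =
            (c :: cs.takeWhile PySem.Chars.isalnum) ::
              pvWords (cs.dropWhile PySem.Chars.isalnum) := by
          rw [pvWords, if_pos hc]
        have hcWno : ∀ x ∈ c :: cs.takeWhile PySem.Chars.isalnum, pvUnd x = false := by
          intro x hx
          rcases List.mem_cons.mp hx with h1 | h1
          · rw [h1]; exact pv_alnum_not_und c hc
          · exact pv_alnum_not_und x (hWall x h1)
        rw [hg, hg2, hwords]
        cases hRc : cs.dropWhile PySem.Chars.isalnum with
        | nil =>
          rw [show pvG false ([] : List Char) = [] from rfl, List.append_nil,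
            pv_rstrip_no_und _ hcWno, pv_inter_cons]
          simp [pvWords]

        | cons d ds =>
          have hd : PySem.Chars.isalnum d = false := pv_head_dropWhile hRc
          have hglue : pvG false (d :: ds) = '_' :: pvG true ds := by
            simp [pvG, hd]
          have hlen : ds.length ≤ n := by
            have h1 : (cs.dropWhile PySem.Chars.isalnum).length ≤ cs.length :=
              List.length_dropWhile_le _ _
            rw [hRc] at h1
            simp at h1 h
            omega
          have hih := ih ds hlen
          have hwds : pvWords (d :: ds) = pvWords ds := by rw [pvWords, if_neg (by simp [hd])]
          rw [hglue, hwds]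
          rw [show (c :: (cs.takeWhile PySem.Chars.isalnum ++ '_' :: pvG true ds)) =
            (c :: cs.takeWhile PySem.Chars.isalnum) ++ ('_' :: pvG true ds) from rfl]
          rw [show ('_' :: pvG true ds) = ['_'] ++ pvG true ds from rfl]
          rw [pv_rstrip_append, pv_rstrip_append, hih]
          have hrU : pvRstrip ['_'] = [] := by decide
          by_cases hnil : pvWords ds = []
          · rw [hnil, show pvInter ([] : List (List Char)) = [] from rfl, if_pos rfl, hrU,
              if_pos rfl, pv_rstrip_no_und _ hcWno, pv_inter_cons]
            simp
          · have hne2 : pvInter (pvWords ds) ≠ [] := by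
              cases hw : pvWords ds with
              | nil => exact absurd hw hnil
              | cons w t =>
                rw [pv_inter_cons]
                have hwne : w ≠ [] :=
                  pv_words_ne_nil ds.length ds le_rfl w (by rw [hw]; exact List.mem_cons_self)
                simp [hwne]
            rw [if_neg hne2]
            have hne3 : ('_' :: pvInter (pvWords ds)) ≠ [] := by simp
            rw [show ['_'] ++ pvInter (pvWords ds) = '_' :: pvInter (pvWords ds) from rfl,
              if_neg hne3, pv_inter_cons, if_neg hnil]
      · -- a non-alphanumeric char is skipped
        have h2 : cs.length ≤ n := by simp at h; omega
        have hg : pvG true (c :: cs) = pvG true cs := by simp [pvG, hc]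
        have hw : pvWords (c :: cs) = pvWords cs := by rw [pvWords, if_neg (by simpa using hc)]
        rw [hg, hw]
        exact ih cs h2

-- A's core on a char list equals the intercalation of the groups
theorem pv_Aside (cs : List Char) :
    PySem.Chars.stripChars (pvG false cs) ['_'] = pvInter (pvWords cs) := by
  show (List.dropWhile pvUnd (List.dropWhile pvUnd (pvG false cs)).reverse).reverse = _
  rw [pv_dropWhile_g cs false]
  exact pv_rstrip_g cs.length cs le_rfl

-- equations for the split₀ worker
theorem pv_go_nil (cur : List Char) (acc : List (List Char)) :
    PySem.Chars.split₀.go [] cur acc =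
      if cur.isEmpty then acc.reverse else (cur.reverse :: acc).reverse := by
  rw [PySem.Chars.split₀.go.eq_def]

theorem pv_go_cons (c : Char) (r cur : List Char) (acc : List (List Char)) :
    PySem.Chars.split₀.go (c :: r) cur acc =
      if PySem.Chars.isspace c = true then
        (if cur.isEmpty then PySem.Chars.split₀.go r [] acc
         else PySem.Chars.split₀.go r [] (cur.reverse :: acc))
      else PySem.Chars.split₀.go r (c :: cur) acc := by
  rw [PySem.Chars.split₀.go.eq_def]

-- B's split₀ on the space-mapped list computes exactly the groups
theorem pv_go_words (cs : List Char) : ∀ (cur : List Char) (acc : List (List Char)),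
    PySem.Chars.split₀.go
        (cs.map (fun ch => if PySem.Chars.isalnum ch then ch else ' ')) cur acc =
      acc.reverse ++
        (if cur = [] then pvWords cs
         else (cur.reverse ++ cs.takeWhile PySem.Chars.isalnum) ::
           pvWords (cs.dropWhile PySem.Chars.isalnum)) := by
  induction cs with
  | nil =>
    intro cur acc
    cases cur with
    | nil => simp [pv_go_nil, pvWords]
    | cons a t => simp [pv_go_nil, pvWords]
  | cons c cs ih =>
    intro cur acc
    by_cases hc : PySem.Chars.isalnum c = true
    · have hsp : PySem.Chars.isspace c = false := pv_alnum_not_space c hc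
      rw [List.map_cons, if_pos hc, pv_go_cons, if_neg (by simp [hsp]), ih (c :: cur) acc,
        if_neg (List.cons_ne_nil c cur)]
      cases cur with
      | nil =>
        rw [if_pos rfl, pvWords, if_pos hc]
        simp
      | cons a t =>
        rw [if_neg (List.cons_ne_nil a t)]
        simp [hc, List.takeWhile_cons, List.dropWhile_cons]
    · have hc' : PySem.Chars.isalnum c = false := by simpa using hc
      have hsp : PySem.Chars.isspace ' ' = true := by decide
      have hw : pvWords (c :: cs) = pvWords cs := by rw [pvWords, if_neg (by simp [hc'])]
      rw [List.map_cons, if_neg hc, pv_go_cons, if_pos hsp]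
      cases cur with
      | nil =>
        rw [show (([] : List Char).isEmpty = true) from rfl, if_pos rfl, ih [] acc,
          if_pos rfl, if_pos rfl, hw]

      | cons a t =>
        rw [show ((a :: t).isEmpty = false) from rfl]
        simp only [Bool.false_eq_true, if_false]
        rw [ih [] ((a :: t).reverse :: acc), if_pos rfl, if_neg (List.cons_ne_nil a t)]
        simp [hc', hw, List.takeWhile_cons, List.dropWhile_cons]

theorem pv_Bside (cs : List Char) :
    PySem.Chars.split₀ (cs.map (fun ch => if PySem.Chars.isalnum ch then ch else ' ')) =
      pvWords cs := by
  unfold PySem.Chars.split₀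
  rw [pv_go_words cs [] [], if_pos rfl]
  simp

theorem pv_toList_inj (a b : String) (h : a.toList = b.toList) : a = b := by
  have := congrArg String.ofList h
  simpa using this

-- ===== VERDICT (by name: the statement is the Claim_ definition above) =====
theorem normalize_rule_code_spec : Claim_equal_normalize_rule_code := by
  intro raw _
  unfold Spec_normalize_rule_code normalize_rule_code normalize_rule_code_alt
  set text := PySem.Str.upper (PySem.Str.strip (raw.getD "")) with htext
  apply pv_toList_inj
  by_cases h0 : text = ""
  · rw [if_pos h0, h0]
    decide
  · rw [if_neg h0]
    rw [PySem.Str.toList_stripChars, PySem.Str.toList_join, PySem.Str.split₀_map_toList]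
    simp only [String.toList_ofList]
    rw [pv_foldl_g text.toList [] false, List.nil_append]
    first
      | rw [show ("_" : String).toList = ['_'] from rfl]
      | skip
    rw [pv_Aside, pv_Bside]
    rfl
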